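-- pv_equiv track=rewrite | github.com/Gendo90/topCoder | 0-300 pts/topcoderMostProfitable.py | bestItem
-- ===== SOURCE A (Python) =====
-- def bestItem(costs, prices, sales, items):
--     profits = []
--     for i, item in enumerate(items):
--         item_profit = (prices[i]-costs[i])*sales[i]
--         profits.append(item_profit)
--
--     top_item = max(profits)
--     if top_item <= 0:
--         return ""
--     else:
--         ind = profits.index(top_item)
--         return str(items[ind])
-- ===== SOURCE B (Python) =====
-- def bestItem(costs, prices, sales, items):
--     best_profit = None
--     best_index = 0
--     for i in range(len(items)):
--         p = (prices[i] - costs[i]) * sales[i]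
--         if best_profit is None or p > best_profit:
--             best_profit = p
--             best_index = i
--     if best_profit is None or best_profit <= 0:
--         return ""
--     return str(items[best_index])
-- ===== Notes on version B (the rewrite author's own statement) =====
-- stated objective: simpler
-- what changed: Replaces A's build-a-profits-list + max() + .index() three-pass structure with a single running-best loop that tracks best_profit and best_index (strict > keeps the first maximum, matching .index), with no intermediate list.
import Mathlib
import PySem

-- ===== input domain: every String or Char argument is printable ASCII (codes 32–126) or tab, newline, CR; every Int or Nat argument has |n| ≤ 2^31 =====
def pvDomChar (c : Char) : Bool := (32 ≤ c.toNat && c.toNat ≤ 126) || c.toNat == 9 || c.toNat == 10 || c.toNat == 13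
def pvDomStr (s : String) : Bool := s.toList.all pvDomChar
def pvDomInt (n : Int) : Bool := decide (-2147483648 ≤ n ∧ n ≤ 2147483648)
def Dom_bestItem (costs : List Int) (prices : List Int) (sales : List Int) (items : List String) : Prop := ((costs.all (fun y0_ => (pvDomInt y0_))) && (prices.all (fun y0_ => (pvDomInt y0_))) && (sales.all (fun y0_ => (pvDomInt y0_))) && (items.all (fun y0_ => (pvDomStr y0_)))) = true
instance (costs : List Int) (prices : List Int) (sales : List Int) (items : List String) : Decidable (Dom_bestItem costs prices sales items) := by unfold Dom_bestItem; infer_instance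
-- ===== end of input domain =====

-- B fuses A's three passes (profits list, max(), .index()) into one running-best loop; simpler, same O(n).


-- ===== PORT A =====
def bestItem (costs : List Int) (prices : List Int) (sales : List Int) (items : List String) : String :=
  let profits := (PySem.List.enumerate items 0).foldl
    (fun acc pr =>
      let item_profit := (PySem.List.pyGetD prices pr.1 0 - PySem.List.pyGetD costs pr.1 0) * PySem.List.pyGetD sales pr.1 0
      acc ++ [item_profit]) []
  match PySem.List.max? profits (fun x => x) with
  | none => ""   -- max([]) raises ValueError; excluded by Pre_bestItem (items ≠ [])
  | some top_item =>
    if top_item ≤ 0 then ""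
    else
      match PySem.List.index? profits top_item with
      | none => ""   -- unreachable: top_item ∈ profits
      | some ind => PySem.List.pyGetD items (ind : Int) ""   -- str(items[ind]); str of a str is itself

-- ===== PORT B =====
def bestItem_alt (costs : List Int) (prices : List Int) (sales : List Int) (items : List String) : String :=
  let st := (List.range items.length).foldl
    (fun (st : Option Int × Nat) (i : Nat) =>
      let p := (PySem.List.pyGetD prices (i : Int) 0 - PySem.List.pyGetD costs (i : Int) 0) * PySem.List.pyGetD sales (i : Int) 0
      match st.1 with
      | none => (some p, i)
      | some b => if b < p then (some p, i) else st)
    (none, 0)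
  match st.1 with
  | none => ""
  | some b => if b ≤ 0 then "" else PySem.List.pyGetD items (st.2 : Int) ""

-- ===== PRECONDITION & SPEC =====
-- Pre_ excludes exactly the inputs where A raises: empty items (max([]) → ValueError) and
-- items longer than costs/prices/sales (IndexError on prices[i]/costs[i]/sales[i]).
def Pre_bestItem (costs : List Int) (prices : List Int) (sales : List Int) (items : List String) : Prop :=
  items ≠ [] ∧ items.length ≤ costs.length ∧ items.length ≤ prices.length ∧ items.length ≤ sales.length
instance (costs : List Int) (prices : List Int) (sales : List Int) (items : List String) : Decidable (Pre_bestItem costs prices sales items) := by unfold Pre_bestItem; infer_instance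

def pvWitness_bestItem : List Int × List Int × List Int × List String := ([1], [3], [2], ["a"])

def Spec_bestItem (costs : List Int) (prices : List Int) (sales : List Int) (items : List String) (out : String) : Prop := out = bestItem_alt costs prices sales items
instance (costs : List Int) (prices : List Int) (sales : List Int) (items : List String) (out : String) : Decidable (Spec_bestItem costs prices sales items out) := by unfold Spec_bestItem; infer_instance

-- ===== CLAIM (what is proved, stated in full; the proofs are below) =====
def Claim_equal_bestItem : Prop := ∀ (costs : List Int) (prices : List Int) (sales : List Int) (items : List String), Dom_bestItem costs prices sales items → Pre_bestItem costs prices sales items → Spec_bestItem costs prices sales items (bestItem costs prices sales items)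

-- ===== LEMMAS AND PROOFS =====
-- the per-index profit, shared by the proofs about both ports
def pvProfit (costs : List Int) (prices : List Int) (sales : List Int) (i : Nat) : Int :=
  (PySem.List.pyGetD prices (i : Int) 0 - PySem.List.pyGetD costs (i : Int) 0) * PySem.List.pyGetD sales (i : Int) 0

-- B's loop step, on (value, index)-independent form
def pvStep (f : Nat → Int) (st : Option Int × Nat) (i : Nat) : Option Int × Nat :=
  match st.1 with
  | none => (some (f i), i)
  | some b => if b < f i then (some (f i), i) else st

theorem pvLoop_inv (f : Nat → Int) : ∀ (n : Nat), 1 ≤ n →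
    ∃ m j, (List.range n).foldl (pvStep f) (none, 0) = (some m, j) ∧
      j < n ∧ f j = m ∧ (∀ i, i < n → f i ≤ m) ∧ (∀ i, i < j → f i < m) := by
  intro n hn
  induction n with
  | zero => omega
  | succ k ih =>
    rcases Nat.eq_or_lt_of_le hn with h1 | h1
    · have hk : k = 0 := by omega
      subst hk
      refine ⟨f 0, 0, by simp [pvStep], by omega, rfl, ?_, by omega⟩
      intro i hi
      have : i = 0 := by omega
      subst this; exact le_refl _
    · obtain ⟨m, j, hfold, hj, hfj, hle, hlt⟩ := ih (by omega)
      rw [List.range_succ, List.foldl_append, hfold, List.foldl_cons, List.foldl_nil]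
      by_cases hc : m < f k
      · refine ⟨f k, k, ?_, by omega, rfl, ?_, ?_⟩
        · simp [pvStep, hc]
        · intro i hi
          rcases Nat.lt_succ_iff_lt_or_eq.mp hi with h | h
          · exact le_of_lt (lt_of_le_of_lt (hle i h) hc)
          · subst h; exact le_refl _
        · intro i hi; exact lt_of_le_of_lt (hle i hi) hc
      · refine ⟨m, j, ?_, by omega, hfj, ?_, hlt⟩
        · simp [pvStep, hc]
        · intro i hi
          rcases Nat.lt_succ_iff_lt_or_eq.mp hi with h | h
          · exact hle i h
          · subst h; omega

-- A's profits list equals the map of pvProfit over range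
theorem pvProfits_eq (costs prices sales : List Int) (items : List String) :
    (PySem.List.enumerate items 0).foldl
      (fun acc pr =>
        let item_profit := (PySem.List.pyGetD prices pr.1 0 - PySem.List.pyGetD costs pr.1 0) * PySem.List.pyGetD sales pr.1 0
        acc ++ [item_profit]) []
    = (List.range items.length).map (pvProfit costs prices sales) := by
  induction items using List.reverseRecOn with
  | nil => simp [PySem.List.enumerate]
  | append_singleton xs x ih =>
    rw [PySem.List.enumerate_append, List.foldl_append, ih]
    simp [PySem.List.enumerate, List.range_succ, pvProfit]

-- characterization of max? with identity key from membership + upper bound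
theorem pvMax_id (l : List Int) (m : Int) (hm : m ∈ l) (hub : ∀ y ∈ l, y ≤ m) :
    PySem.List.max? l (fun x => x) = some m := by
  cases h : PySem.List.max? l (fun x => x) with
  | none =>
    rw [PySem.List.max?_eq_none_iff] at h
    subst h; simp at hm
  | some m' =>
    have h1 := PySem.List.max?_mem h
    have h2 := PySem.List.max?_isMax h m hm
    have h3 := hub m' h1
    simp only [] at h2
    exact congrArg some (le_antisymm h3 h2)

-- first-occurrence characterization of index?
theorem pvIndex_first (l : List Int) (m : Int) (j : Nat) (hj : j < l.length)
    (hfj : l[j] = m) (hlt : ∀ i (hi : i < l.length), i < j → l[i] ≠ m) :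
    PySem.List.index? l m = some j := by
  rw [PySem.List.index?_eq_some_iff]
  refine ⟨l.take j, l.drop (j + 1), ?_, by rw [List.length_take]; omega, ?_⟩
  · conv_lhs => rw [← List.take_append_drop j l]
    congr 1
    rw [List.drop_eq_getElem_cons hj, hfj]
  · intro hmem
    obtain ⟨i, hi, hval⟩ := List.getElem_of_mem hmem
    simp at hi
    rw [List.getElem_take] at hval
    exact hlt i (by omega) (by omega) hval

-- ===== VERDICT (by name: the statement is the Claim_ definition above) =====
theorem bestItem_spec : Claim_equal_bestItem := by
  intro costs prices sales items _ hpre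
  obtain ⟨hne, _, _, _⟩ := hpre
  have hn : 1 ≤ items.length := List.length_pos_iff.mpr hne
  obtain ⟨m, j, hfold, hj, hfj, hle, hlt⟩ := pvLoop_inv (pvProfit costs prices sales) items.length hn
  unfold Spec_bestItem bestItem bestItem_alt
  rw [pvProfits_eq costs prices sales items]
  have hBfold : (List.range items.length).foldl
      (fun (st : Option Int × Nat) (i : Nat) =>
        let p := (PySem.List.pyGetD prices (i : Int) 0 - PySem.List.pyGetD costs (i : Int) 0) * PySem.List.pyGetD sales (i : Int) 0
        match st.1 with
        | none => (some p, i)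
        | some b => if b < p then (some p, i) else st)
      (none, 0) = (some m, j) := hfold
  rw [hBfold]
  set l := (List.range items.length).map (pvProfit costs prices sales) with hl
  have hlen : l.length = items.length := by simp [hl]
  have hmax : PySem.List.max? l (fun x => x) = some m := by
    apply pvMax_id
    · rw [hl]
      refine List.mem_map.mpr ⟨j, List.mem_range.mpr hj, hfj⟩
    · intro y hy
      rw [hl] at hy
      obtain ⟨i, hi, hval⟩ := List.mem_map.mp hy
      rw [← hval]; exact hle i (List.mem_range.mp hi)
  have hidx : PySem.List.index? l m = some j := by
    apply pvIndex_first l m j (by omega)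
    · simp [hl, hfj]
    · intro i hilen hij
      have : l[i] = pvProfit costs prices sales i := by simp [hl]
      rw [this]
      exact ne_of_lt (hlt i hij)
  simp only [hmax, hidx]
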